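-- pv_equiv track=rewrite | github.com/nora28alfa/kicad_fp_converter | kicadfpconverter.py | creat_fpmodel
-- ===== SOURCE A (Python) =====
-- class KiCadFootprint3DModel:
-- 	def __init__(self):
-- 		self.path="undefine"
-- 		self.xoffset="0"
-- 		self.yoffset="0"
-- 		self.zoffset="0"
-- 		self.xscale="0"
-- 		self.yscale="0"
-- 		self.zscale="0"
-- 		self.xrotate="0"
-- 		self.yrotate="0"
-- 		self.zrotate="0"
--
-- 	def set_contents(self, items):
-- 		if items[0]=="Na":
-- 			self.path=items[1]
-- 			self.path = self.path.lstrip("\"")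
-- 			self.path = self.path.rstrip("\"")
-- 		elif items[0]=="Of":
-- 			self.xoffset=items[1]
-- 			self.yoffset=items[2]
-- 			self.zoffset=items[3]
-- 		elif items[0]=="Sc":
-- 			self.xscale=items[1]
-- 			self.yscale=items[2]
-- 			self.zscale=items[3]
-- 		elif items[0]=="Ro":
-- 			self.xrotate=items[1]
-- 			self.yrotate=items[2]
-- 			self.zrotate=items[3]
--
-- 	def get_new_format(self):
-- 		linelist=["  (model %s" %(self.path)]
-- 		linelist.append("    (at (xyz %s %s %s))" %(self.xoffset, self.yoffset, self.zoffset))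
-- 		linelist.append("    (scale (xyz %s %s %s))" %(self.xscale, self.yscale, self.zscale))
-- 		linelist.append("    (rotate (xyz %s %s %s))" %(self.xrotate, self.yrotate, self.zrotate))
-- 		linelist.append("  )")
-- 		return linelist
--
-- def creat_fpmodel(ifs):
-- 	fpmodel=KiCadFootprint3DModel()
-- 	for line in ifs:
-- 		items = line.split()
-- 		if items[0]=="$EndSHAPE3D":
-- 			break
-- 		fpmodel.set_contents(items)
--
-- 	return fpmodel.get_new_format()
-- ===== SOURCE B (Python) =====
-- def creat_fpmodel(ifs):
--     # Stage 1: truncate at the end marker, keeping each line's token list.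
--     rows = []
--     for line in ifs:
--         toks = line.split()
--         if toks[:1] == ["$EndSHAPE3D"]:
--             break
--         rows.append(toks)
--
--     # Stage 2: the effective line for a tag is the first match scanning backwards
--     # (no mutable per-tag state: selection is a reverse search over the prefix).
--     def last_row(tag):
--         for toks in reversed(rows):
--             if toks[:1] == [tag]:
--                 return toks
--         return None
--
--     na = last_row("Na")
--     path = na[1].strip('"') if na is not None else "undefine"
--
--     def xyz(tag):
--         row = last_row(tag)
--         return " ".join(row[1:4]) if row is not None else "0 0 0"
--
--     return [
--         "  (model %s" % path,
--         "    (at (xyz %s))" % xyz("Of"),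
--         "    (scale (xyz %s))" % xyz("Sc"),
--         "    (rotate (xyz %s))" % xyz("Ro"),
--         "  )",
--     ]
-- ===== Notes on version B (the rewrite author's own statement) =====
-- stated objective: alternative
-- what changed: Replaces A's single forward pass folding each line into mutable per-tag state by two stages: truncate the lines at the end marker into a list of token rows, then select each tag's effective row by a backward search (first match in the reversed prefix) and format from slices of those rows.
import Mathlib
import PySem

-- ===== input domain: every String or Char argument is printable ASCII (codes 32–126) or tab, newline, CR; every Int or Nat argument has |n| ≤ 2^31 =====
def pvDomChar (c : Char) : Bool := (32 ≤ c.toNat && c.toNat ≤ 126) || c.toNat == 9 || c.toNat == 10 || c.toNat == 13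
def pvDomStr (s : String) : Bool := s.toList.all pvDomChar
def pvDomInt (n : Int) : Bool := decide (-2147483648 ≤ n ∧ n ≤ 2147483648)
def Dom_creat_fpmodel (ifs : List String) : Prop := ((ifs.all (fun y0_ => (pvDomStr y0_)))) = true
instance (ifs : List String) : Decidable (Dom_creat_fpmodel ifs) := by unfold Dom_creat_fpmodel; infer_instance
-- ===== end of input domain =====

-- B replaces A's forward fold over mutable per-tag state by two stages: truncate the lines at
-- the end marker into a list of token rows, then select each tag's effective row by a backward
-- search (first match in the reversed prefix); alternative decomposition, same cost.
-- ===== PORT A =====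

-- s.lstrip('"') / s.rstrip('"') — one-sided strip of a single char set; ported by hand
-- (dropWhile on the char list), exact for this call.
def pvLstripQ (s : String) : String := String.ofList (s.toList.dropWhile (fun c => c == '"'))
def pvRstripQ (s : String) : String := String.ofList ((s.toList.reverse.dropWhile (fun c => c == '"')).reverse)

-- items[i]; A raises IndexError where this is out of range — those inputs are outside Pre_.
def pvItem (items : List String) (i : Int) : String := (PySem.List.pyGet? items i).getD ""

structure KiCadFootprint3DModel where
  path : String
  xoffset : String
  yoffset : String
  zoffset : String
  xscale : String
  yscale : String
  zscale : String
  xrotate : String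
  yrotate : String
  zrotate : String
deriving Repr, DecidableEq

def modelInit : KiCadFootprint3DModel :=
  ⟨"undefine", "0", "0", "0", "0", "0", "0", "0", "0", "0"⟩

def setContents (m : KiCadFootprint3DModel) (items : List String) : KiCadFootprint3DModel :=
  if pvItem items 0 == "Na" then
    { m with path := pvRstripQ (pvLstripQ (pvItem items 1)) }
  else if pvItem items 0 == "Of" then
    { m with xoffset := pvItem items 1, yoffset := pvItem items 2, zoffset := pvItem items 3 }
  else if pvItem items 0 == "Sc" then
    { m with xscale := pvItem items 1, yscale := pvItem items 2, zscale := pvItem items 3 }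
  else if pvItem items 0 == "Ro" then
    { m with xrotate := pvItem items 1, yrotate := pvItem items 2, zrotate := pvItem items 3 }
  else m

def getNewFormat (m : KiCadFootprint3DModel) : List String :=
  ["  (model " ++ m.path,
   "    (at (xyz " ++ m.xoffset ++ " " ++ m.yoffset ++ " " ++ m.zoffset ++ "))",
   "    (scale (xyz " ++ m.xscale ++ " " ++ m.yscale ++ " " ++ m.zscale ++ "))",
   "    (rotate (xyz " ++ m.xrotate ++ " " ++ m.yrotate ++ " " ++ m.zrotate ++ "))",
   "  )"]

-- the for-loop with its break
def loopA (m : KiCadFootprint3DModel) : List String → KiCadFootprint3DModel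
  | [] => m
  | line :: rest =>
    let items := PySem.Str.split₀ line
    if pvItem items 0 == "$EndSHAPE3D" then m
    else loopA (setContents m items) rest

def creat_fpmodel (ifs : List String) : List String :=
  getNewFormat (loopA modelInit ifs)

-- ===== PORT B =====

-- stage 1: the token rows before the end marker (toks[:1] == ["$EndSHAPE3D"] breaks)
def stage1 : List String → List (List String)
  | [] => []
  | line :: rest =>
    let toks := PySem.Str.split₀ line
    if toks.take 1 == ["$EndSHAPE3D"] then []
    else toks :: stage1 rest

-- stage 2: first match scanning backwards
def lastRow (rows : List (List String)) (tag : String) : Option (List String) :=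
  rows.reverse.find? (fun toks => toks.take 1 == [tag])

def xyzB (rows : List (List String)) (tag : String) : String :=
  match lastRow rows tag with
  | some row => PySem.Str.join " " (PySem.List.slice row (some 1) (some 4))
  | none => "0 0 0"

def creat_fpmodel_alt (ifs : List String) : List String :=
  let rows := stage1 ifs
  let path :=
    match lastRow rows "Na" with
    | some na => PySem.Str.stripChars (pvItem na 1) "\""   -- na[1].strip('"'); na[1] out of range is outside Pre_
    | none => "undefine"
  ["  (model " ++ path,
   "    (at (xyz " ++ xyzB rows "Of" ++ "))",
   "    (scale (xyz " ++ xyzB rows "Sc" ++ "))",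
   "    (rotate (xyz " ++ xyzB rows "Ro" ++ "))",
   "  )"]

-- ===== PRECONDITION & SPEC =====
-- Pre_ excludes exactly the inputs on which A raises IndexError: before the first line whose
-- first token is "$EndSHAPE3D", every line must split non-empty, a "Na" line must have ≥ 2
-- tokens and an "Of"/"Sc"/"Ro" line ≥ 4 tokens.
def Pre_creat_fpmodel (ifs : List String) : Prop :=
  ∀ l ∈ ifs.takeWhile (fun l => !((PySem.Str.split₀ l).head? == some "$EndSHAPE3D")),
    (PySem.Str.split₀ l) ≠ [] ∧
    ((PySem.Str.split₀ l).head? = some "Na" → 2 ≤ (PySem.Str.split₀ l).length) ∧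
    ((PySem.Str.split₀ l).head? = some "Of" ∨ (PySem.Str.split₀ l).head? = some "Sc" ∨
       (PySem.Str.split₀ l).head? = some "Ro" → 4 ≤ (PySem.Str.split₀ l).length)
instance (ifs : List String) : Decidable (Pre_creat_fpmodel ifs) := by
  unfold Pre_creat_fpmodel; infer_instance

def pvWitness_creat_fpmodel : List String :=
  ["Na \"model.wrl\"", "Of 1 2 3", "$EndSHAPE3D", "junk"]

def Spec_creat_fpmodel (ifs : List String) (out : List String) : Prop := out = creat_fpmodel_alt ifs
instance (ifs : List String) (out : List String) : Decidable (Spec_creat_fpmodel ifs out) := by unfold Spec_creat_fpmodel; infer_instance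

-- ===== CLAIM =====
def Claim_equal_creat_fpmodel : Prop := ∀ (ifs : List String), Dom_creat_fpmodel ifs → Pre_creat_fpmodel ifs → Spec_creat_fpmodel ifs (creat_fpmodel ifs)

-- ===== LEMMAS AND PROOFS =====

-- A's break condition and B's agree on every token list (incl. the empty one)
theorem tagEq (toks : List String) (s : String) (hs : s ≠ "") :
    (pvItem toks 0 == s) = (toks.take 1 == [s]) := by
  cases toks with
  | nil => simp [pvItem, PySem.List.pyGet?, Ne.symm hs]
  | cons a t => simp [pvItem, PySem.List.pyGet?, PySem.List.pyIdx?]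

-- the value B reads for one coordinate
def gRow (rows : List (List String)) (tag : String) (i : Int) : String :=
  match lastRow rows tag with
  | some r => pvItem r i
  | none => "0"

def pathRow (rows : List (List String)) : String :=
  match lastRow rows "Na" with
  | some na => pvRstripQ (pvLstripQ (pvItem na 1))
  | none => "undefine"

theorem lastRow_concat (rows : List (List String)) (r : List String) (tag : String) :
    lastRow (rows ++ [r]) tag = if r.take 1 == [tag] then some r else lastRow rows tag := by
  simp only [lastRow, List.reverse_append, List.reverse_singleton, List.singleton_append,
    List.find?_cons]
  cases h : (r.take 1 == [tag]) <;> simp_all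

-- the fold of A's updates over the truncated rows, field by field, equals B's backward selection
theorem fold_spec (rows : List (List String)) :
    let F := rows.foldl setContents modelInit
    F.path = pathRow rows ∧
    F.xoffset = gRow rows "Of" 1 ∧ F.yoffset = gRow rows "Of" 2 ∧ F.zoffset = gRow rows "Of" 3 ∧
    F.xscale = gRow rows "Sc" 1 ∧ F.yscale = gRow rows "Sc" 2 ∧ F.zscale = gRow rows "Sc" 3 ∧
    F.xrotate = gRow rows "Ro" 1 ∧ F.yrotate = gRow rows "Ro" 2 ∧ F.zrotate = gRow rows "Ro" 3 := by
  induction rows using List.reverseRecOn with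
  | nil =>
    refine ⟨rfl, rfl, rfl, rfl, rfl, rfl, rfl, rfl, rfl, rfl⟩
  | append_singleton rows r ih =>
    obtain ⟨hp, h1, h2, h3, h4, h5, h6, h7, h8, h9⟩ := ih
    simp only [List.foldl_append, List.foldl_cons, List.foldl_nil]
    set F := List.foldl setContents modelInit rows with hF
    unfold setContents
    rw [tagEq r "Na" (by decide), tagEq r "Of" (by decide), tagEq r "Sc" (by decide),
        tagEq r "Ro" (by decide)]
    by_cases hNa : r.take 1 == ["Na"]
    · have hNa' : r.take 1 = ["Na"] := by simpa using hNa
      refine ⟨?_, ?_, ?_, ?_, ?_, ?_, ?_, ?_, ?_, ?_⟩ <;>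
        simp [hNa, pathRow, gRow, lastRow_concat, hNa', hp, h1, h2, h3, h4, h5, h6, h7, h8, h9]
    · by_cases hOf : r.take 1 == ["Of"]
      · have hOf' : r.take 1 = ["Of"] := by simpa using hOf
        refine ⟨?_, ?_, ?_, ?_, ?_, ?_, ?_, ?_, ?_, ?_⟩ <;>
          simp [hNa, hOf, pathRow, gRow, lastRow_concat, hOf', hp, h1, h2, h3, h4, h5, h6, h7, h8, h9]
      · by_cases hSc : r.take 1 == ["Sc"]
        · have hSc' : r.take 1 = ["Sc"] := by simpa using hSc
          refine ⟨?_, ?_, ?_, ?_, ?_, ?_, ?_, ?_, ?_, ?_⟩ <;>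
            simp [hNa, hOf, hSc, pathRow, gRow, lastRow_concat, hSc', hp, h1, h2, h3, h4, h5, h6, h7, h8, h9]
        · by_cases hRo : r.take 1 == ["Ro"]
          · have hRo' : r.take 1 = ["Ro"] := by simpa using hRo
            refine ⟨?_, ?_, ?_, ?_, ?_, ?_, ?_, ?_, ?_, ?_⟩ <;>
              simp [hNa, hOf, hSc, hRo, pathRow, gRow, lastRow_concat, hRo', hp, h1, h2, h3, h4, h5, h6, h7, h8, h9]
          · refine ⟨?_, ?_, ?_, ?_, ?_, ?_, ?_, ?_, ?_, ?_⟩ <;>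
              simp [hNa, hOf, hSc, hRo, pathRow, gRow, lastRow_concat, hp, h1, h2, h3, h4, h5, h6, h7, h8, h9]

-- A's loop is the fold of setContents over B's truncated rows
theorem loopA_eq_fold (ifs : List String) :
    ∀ m, loopA m ifs = (stage1 ifs).foldl setContents m := by
  induction ifs with
  | nil => intro m; rfl
  | cons line rest ih =>
    intro m
    simp only [loopA, stage1]
    rw [tagEq _ _ (by decide)]
    by_cases h : (PySem.Str.split₀ line).take 1 == ["$EndSHAPE3D"]
    · simp [h]
    · simp [h, ih]

-- B's rows are the token lists of the takeWhile prefix Pre_ speaks about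
theorem stage1_eq_takeWhile (ifs : List String) :
    stage1 ifs = (ifs.takeWhile (fun l => !((PySem.Str.split₀ l).head? == some "$EndSHAPE3D"))).map PySem.Str.split₀ := by
  induction ifs with
  | nil => rfl
  | cons line rest ih =>
    simp only [stage1, List.takeWhile]
    have hhd : ((PySem.Str.split₀ line).take 1 == ["$EndSHAPE3D"]) = ((PySem.Str.split₀ line).head? == some "$EndSHAPE3D") := by
      cases PySem.Str.split₀ line <;> simp
    rw [hhd]
    by_cases h : (PySem.Str.split₀ line).head? == some "$EndSHAPE3D"
    · simp [h]
    · simp [h, ih]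

-- strip('"') = lstrip('"') then rstrip('"')
theorem strip_eq (s : String) :
    PySem.Str.stripChars s "\"" = pvRstripQ (pvLstripQ s) := by
  apply String.toList_inj.mp
  have hp : (fun c : Char => c == '"') = (fun c : Char => decide (c = '"')) := by
    funext c
    apply Bool.eq_iff_iff.mpr
    simp
  simp [PySem.Str.toList_stripChars, PySem.Chars.stripChars, pvLstripQ, pvRstripQ,
    String.toList_ofList, hp]

-- with ≥ 4 tokens, " ".join(row[1:4]) is the three fields spelled out
theorem join_slice (r : List String) (h : 4 ≤ r.length) :
    PySem.Str.join " " (PySem.List.slice r (some 1) (some 4)) =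
      pvItem r 1 ++ " " ++ pvItem r 2 ++ " " ++ pvItem r 3 := by
  match r, h with
  | a :: b :: c :: d :: t, _ =>
    apply String.toList_inj.mp
    rw [show ((1:Int)) = ((1:Nat):Int) from rfl, show ((4:Int)) = ((4:Nat):Int) from rfl,
        show ((2:Int)) = ((2:Nat):Int) from rfl, show ((3:Int)) = ((3:Nat):Int) from rfl]
    unfold pvItem
    rw [PySem.List.slice_natCast, PySem.List.pyGet?_natCast, PySem.List.pyGet?_natCast,
        PySem.List.pyGet?_natCast]
    simp [PySem.Str.toList_join, PySem.Chars.join, List.intercalate]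

theorem lastRow_mem (rows : List (List String)) (tag : String) (r : List String)
    (h : lastRow rows tag = some r) : r ∈ rows ∧ r.take 1 = [tag] := by
  unfold lastRow at h
  have h1 := List.find?_some h
  have h2 := List.mem_of_find?_eq_some h
  exact ⟨by simpa using h2, by simpa using h1⟩

-- ===== VERDICT =====
theorem creat_fpmodel_spec : Claim_equal_creat_fpmodel := by
  intro ifs _ hpre
  unfold Spec_creat_fpmodel creat_fpmodel creat_fpmodel_alt
  rw [loopA_eq_fold]
  obtain ⟨hp, h1, h2, h3, h4, h5, h6, h7, h8, h9⟩ := fold_spec (stage1 ifs)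
  have hlen : ∀ tag, tag = "Of" ∨ tag = "Sc" ∨ tag = "Ro" →
      ∀ r, lastRow (stage1 ifs) tag = some r → 4 ≤ r.length := by
    intro tag htag r hr
    obtain ⟨hmem, hhd⟩ := lastRow_mem _ _ _ hr
    rw [stage1_eq_takeWhile] at hmem
    obtain ⟨l, hl, rfl⟩ := List.mem_map.mp hmem
    have := (hpre l hl).2.2
    apply this
    have : (PySem.Str.split₀ l).head? = some tag := by
      cases hsp : PySem.Str.split₀ l with
      | nil => rw [hsp] at hhd; simp at hhd
      | cons a t => rw [hsp] at hhd; simp at hhd; simp [hhd]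
    rcases htag with h | h | h <;> simp [h, this]
  have hxyz : ∀ tag, tag = "Of" ∨ tag = "Sc" ∨ tag = "Ro" →
      xyzB (stage1 ifs) tag = gRow (stage1 ifs) tag 1 ++ " " ++ gRow (stage1 ifs) tag 2 ++ " " ++ gRow (stage1 ifs) tag 3 := by
    intro tag htag
    unfold xyzB gRow
    cases hr : lastRow (stage1 ifs) tag with
    | none => rfl
    | some r => exact join_slice r (hlen tag htag r hr)
  have hpath :
      (match lastRow (stage1 ifs) "Na" with
       | some na => PySem.Str.stripChars (pvItem na 1) "\""
       | none => "undefine") = pathRow (stage1 ifs) := by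
    unfold pathRow
    cases lastRow (stage1 ifs) "Na" with
    | none => rfl
    | some na => exact strip_eq _
  simp only [getNewFormat, hp, h1, h2, h3, h4, h5, h6, h7, h8, h9,
    hxyz "Of" (by tauto), hxyz "Sc" (by tauto), hxyz "Ro" (by tauto), hpath]
  simp [String.append_assoc]
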